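-- pv_equiv track=rewrite | github.com/andrewhuot/autoagent-vnextcc | optimizer/skill_synthesizer.py | _cluster_mutations
-- ===== SOURCE A (Python) =====
-- from collections import defaultdict
--
-- def _cluster_mutations(
--     mutations: list[dict]
-- ) -> dict[str, list[dict]]:
--     """Group mutations by (surface, mutation_type) key."""
--     clusters: dict[str, list[dict]] = defaultdict(list)
--     for m in mutations:
--         key = f"{m.get('config_section', 'prompts')}|{m.get('mutation_type', 'instruction_rewrite')}"
--         clusters[key].append(m)
--     return dict(clusters)
-- ===== SOURCE B (Python) =====
-- def _cluster_mutations(mutations):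
--     """Group mutations by (surface, mutation_type) key."""
--     def key(m):
--         return f"{m.get('config_section', 'prompts')}|{m.get('mutation_type', 'instruction_rewrite')}"
--     keys = list(dict.fromkeys(key(m) for m in mutations))
--     return {k: [m for m in mutations if key(m) == k] for k in keys}
-- ===== Notes on version B (the rewrite author's own statement) =====
-- stated objective: alternative
-- what changed: B replaces A's single defaultdict bucket-append pass with computing the ordered list of distinct keys via dict.fromkeys and then building each group by filtering the mutation list per key.
import Mathlib
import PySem

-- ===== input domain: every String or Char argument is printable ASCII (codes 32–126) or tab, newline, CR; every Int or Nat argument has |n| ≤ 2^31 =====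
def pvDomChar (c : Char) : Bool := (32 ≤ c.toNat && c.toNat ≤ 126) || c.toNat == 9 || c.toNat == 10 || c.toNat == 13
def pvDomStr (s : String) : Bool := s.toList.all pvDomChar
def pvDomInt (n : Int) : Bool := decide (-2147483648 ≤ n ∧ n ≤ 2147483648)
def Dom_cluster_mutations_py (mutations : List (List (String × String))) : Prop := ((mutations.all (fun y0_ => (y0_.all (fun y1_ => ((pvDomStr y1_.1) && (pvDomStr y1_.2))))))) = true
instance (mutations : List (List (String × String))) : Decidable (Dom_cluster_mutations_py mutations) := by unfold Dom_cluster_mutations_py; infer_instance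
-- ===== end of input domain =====

-- B replaces A's single hash-bucket pass with ordered key dedup (dict.fromkeys) plus a
-- comprehension filtering the mutations of each key (objective: alternative, not faster).

-- the grouping key both Pythons compute:
-- f"{m.get('config_section', 'prompts')}|{m.get('mutation_type', 'instruction_rewrite')}"
def pvMutKey (m : List (String × String)) : String :=
  (PySem.Dict.mk m).getD "config_section" "prompts" ++ "|" ++
    (PySem.Dict.mk m).getD "mutation_type" "instruction_rewrite"

-- ===== PORT A =====
-- clusters = defaultdict(list); for m: clusters[key].append(m); return dict(clusters)
def cluster_mutations_py (mutations : List (List (String × String))) : List (String × List (List (String × String))) :=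
  (mutations.foldl (fun d m => d.modify (pvMutKey m) [] (· ++ [m])) PySem.Dict.empty).items

-- ===== PORT B =====
-- keys = list(dict.fromkeys(key(m) for m in mutations)); {k: [m for m in mutations if key(m) == k] for k in keys}
def cluster_mutations_py_alt (mutations : List (List (String × String))) : List (String × List (List (String × String))) :=
  (PySem.List.dedup (mutations.map pvMutKey)).map
    (fun k => (k, mutations.filter (fun m => pvMutKey m == k)))

-- ===== PRECONDITION & SPEC =====
def Spec_cluster_mutations_py (mutations : List (List (String × String))) (out : List (String × List (List (String × String)))) : Prop := out = cluster_mutations_py_alt mutations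
instance (mutations : List (List (String × String))) (out : List (String × List (List (String × String)))) : Decidable (Spec_cluster_mutations_py mutations out) := by unfold Spec_cluster_mutations_py; infer_instance

-- ===== CLAIM (what is proved, stated in full; the proofs are below) =====
def Claim_equal_cluster_mutations_py : Prop := ∀ (mutations : List (List (String × String))), Dom_cluster_mutations_py mutations → Spec_cluster_mutations_py mutations (cluster_mutations_py mutations)

-- ===== LEMMAS AND PROOFS =====

-- A's defaultdict loop, viewed as the pair loop of PySem's grouping lemmas
theorem cluster_dict_eq_pair_foldl (mutations : List (List (String × String))) :
    mutations.foldl (fun d m => d.modify (pvMutKey m) [] (· ++ [m])) PySem.Dict.empty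
      = (mutations.map (fun m => (pvMutKey m, m))).foldl
          (fun d p => d.modify p.1 [] (· ++ [p.2])) PySem.Dict.empty := by
  rw [List.foldl_map]

-- ===== VERDICT (by name: the statement is the Claim_ definition above) =====
theorem cluster_mutations_py_spec : Claim_equal_cluster_mutations_py := by
  intro mutations _
  show cluster_mutations_py mutations = cluster_mutations_py_alt mutations
  unfold cluster_mutations_py cluster_mutations_py_alt
  set d := mutations.foldl (fun d m => d.modify (pvMutKey m) [] (· ++ [m])) PySem.Dict.empty with hd
  have hnd : d.keys.Nodup := by
    exact PySem.Dict.nodup_keys_foldl_modify_key mutations pvMutKey [] (fun _ m => (· ++ [m]))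
      PySem.Dict.empty PySem.Dict.nodup_keys_empty
  have hkeys : d.keys = PySem.List.dedup (mutations.map pvMutKey) := by
    rw [hd, PySem.Dict.keys_foldl_modify_key, PySem.Dict.keys_empty,
        PySem.Set.update_nil_left, PySem.List.dedup_eq_ofList]
  have hget : ∀ k, d.getD k [] = mutations.filter (fun m => pvMutKey m == k) := by
    intro k
    rw [hd, cluster_dict_eq_pair_foldl, PySem.Dict.getD_foldl_modify_append,
        PySem.Dict.getD_empty]
    simp [List.filter_map]
    exact List.map_id'' (congrFun rfl) _
  rw [PySem.Dict.items_eq_map_keys d hnd [], hkeys]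
  exact List.map_congr_left (fun k _ => by rw [hget k])
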